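-- pv_equiv track=rewrite | github.com/tym3k1/pythonlernin | lab5zad8.py | samogloski
-- ===== SOURCE A (Python) =====
-- def samogloski(data, vowels):
--     start = 0
--     idx = 0
--     for index in data:
--         idx += 1
--         if index in vowels:
--             yield data[start:idx]
--             start=idx
-- ===== SOURCE B (Python) =====
-- def samogloski(data, vowels):
--     rest = data
--     while True:
--         cut = None
--         for j, c in enumerate(rest):
--             if c in vowels:
--                 cut = j
--                 break
--         if cut is None:
--             return
--         yield rest[:cut + 1]
--         rest = rest[cut + 1:]
-- ===== Notes on version B (the rewrite author's own statement) =====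
-- stated objective: alternative
-- what changed: B replaces A's single indexed loop over the whole string (carrying start/idx state) by a shrinking-suffix loop: repeatedly find the first vowel of the remaining suffix, yield that head chunk, and continue on the suffix after it, with no absolute indices at all.
import Mathlib
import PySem

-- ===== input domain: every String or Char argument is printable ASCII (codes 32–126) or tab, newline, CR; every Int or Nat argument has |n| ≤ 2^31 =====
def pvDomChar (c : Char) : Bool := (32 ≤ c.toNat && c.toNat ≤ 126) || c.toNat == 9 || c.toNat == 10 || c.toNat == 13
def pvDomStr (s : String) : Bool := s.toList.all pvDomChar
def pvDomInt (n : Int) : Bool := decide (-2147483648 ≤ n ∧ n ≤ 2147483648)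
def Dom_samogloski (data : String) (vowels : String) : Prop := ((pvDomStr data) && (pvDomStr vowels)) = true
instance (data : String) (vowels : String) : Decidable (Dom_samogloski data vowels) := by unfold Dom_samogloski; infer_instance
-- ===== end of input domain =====

-- B replaces A's single indexed loop over the whole string by repeated head-chunk removal:
-- find the first vowel of the remaining suffix, emit that prefix, and continue on the rest.
-- Alternative decomposition, same results. Both are Python generators; the ports return the
-- list of yielded values.

-- ===== PORT A =====
-- A's loop: walk the characters carrying start and idx; on a vowel yield data[start:idx] and reset start.
def samogloskiGoA (data vowels : List Char) : List Char → Int → Int → List String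
  | [], _, _ => []
  | c :: cs, start, idx =>
    let idx' := idx + 1
    if vowels.contains c then
      String.ofList (PySem.List.slice data (some start) (some idx')) :: samogloskiGoA data vowels cs idx' idx'
    else
      samogloskiGoA data vowels cs start idx'

def samogloski (data : String) (vowels : String) : List String :=
  samogloskiGoA data.toList vowels.toList data.toList 0 0

-- ===== PORT B =====
-- B's inner loop: 'for j, c in enumerate(rest): if c in vowels: cut = j; break' — first vowel index.
def samogloskiCut (vowels : List Char) : List Char → Nat → Option Nat
  | [], _ => none
  | c :: cs, j => if vowels.contains c then some j else samogloskiCut vowels cs (j + 1)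

-- Port-level fact cited by the termination argument of the while loop below.
theorem samogloskiCut_ne_nil {vowels : List Char} {rest : List Char} {j cut : Nat}
    (h : samogloskiCut vowels rest j = some cut) : rest ≠ [] := by
  intro e; subst e; simp [samogloskiCut] at h

-- B's while loop: yield rest[:cut+1], then continue with rest = rest[cut+1:].
def samogloskiGoB (vowels : List Char) (rest : List Char) : List String :=
  match h : samogloskiCut vowels rest 0 with
  | none => []
  | some cut =>
    String.ofList (PySem.List.slice rest none (some ((cut + 1 : Nat) : Int))) ::
      samogloskiGoB vowels (PySem.List.slice rest (some ((cut + 1 : Nat) : Int)) none)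
termination_by rest.length
decreasing_by
  have hne : rest ≠ [] := samogloskiCut_ne_nil h
  rw [PySem.List.slice_from_natCast]
  cases rest with
  | nil => exact absurd rfl hne
  | cons a as => simp [List.length_drop]

def samogloski_alt (data : String) (vowels : String) : List String :=
  samogloskiGoB vowels.toList data.toList

-- ===== PRECONDITION & SPEC =====
def Spec_samogloski (data : String) (vowels : String) (out : List String) : Prop := out = samogloski_alt data vowels
instance (data : String) (vowels : String) (out : List String) : Decidable (Spec_samogloski data vowels out) := by unfold Spec_samogloski; infer_instance

-- ===== CLAIM (what is proved, stated in full; the proofs are below) =====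
def Claim_equal_samogloski : Prop := ∀ (data : String) (vowels : String), Dom_samogloski data vowels → Spec_samogloski data vowels (samogloski data vowels)

-- ===== LEMMAS AND PROOFS =====
theorem samogloskiCut_shift (vowels : List Char) :
    ∀ (cs : List Char) (j : Nat), samogloskiCut vowels cs j = (samogloskiCut vowels cs 0).map (· + j) := by
  intro cs
  induction cs with
  | nil => intro j; simp [samogloskiCut]
  | cons c cs ih =>
    intro j
    by_cases hc : c ∈ vowels
    · simp [samogloskiCut, hc]
    · rw [samogloskiCut, samogloskiCut, if_neg (by simp [hc] : ¬ (vowels.contains c = true)), if_neg (by simp [hc] : ¬ (vowels.contains c = true)), ih (j + 1), ih 1]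
      cases samogloskiCut vowels cs 0 <;> simp <;> omega

-- A's loop, seen through B's eyes: from any state it emits the slice up to the first vowel of the
-- remaining characters, then restarts past it.
theorem samogloskiGoA_step (data vowels : List Char) :
    ∀ (cs : List Char) (start idx : Int),
      samogloskiGoA data vowels cs start idx =
        match samogloskiCut vowels cs 0 with
        | none => []
        | some j =>
          String.ofList (PySem.List.slice data (some start) (some (idx + j + 1))) ::
            samogloskiGoA data vowels (cs.drop (j + 1)) (idx + j + 1) (idx + j + 1) := by
  intro cs
  induction cs with
  | nil => intro start idx; simp [samogloskiGoA, samogloskiCut]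
  | cons c cs ih =>
    intro start idx
    by_cases hc : c ∈ vowels
    · simp [samogloskiGoA, samogloskiCut, hc]
    · rw [samogloskiGoA, if_neg (by simp [hc] : ¬ (vowels.contains c = true)), ih, samogloskiCut, if_neg (by simp [hc] : ¬ (vowels.contains c = true)), samogloskiCut_shift vowels cs 1]
      cases hj : samogloskiCut vowels cs 0 with
      | none => simp
      | some j =>
        simp only [Option.map_some]
        have h1 : idx + 1 + (j : Int) + 1 = idx + ((j + 1 : Nat) : Int) + 1 := by push_cast; ring
        have h2 : (cs.drop (j + 1)) = (c :: cs).drop ((j + 1) + 1) := by simp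
        rw [h1, h2]

-- Unfolding lemmas for B's while loop.
theorem samogloskiGoB_none (vowels rest : List Char)
    (h : samogloskiCut vowels rest 0 = none) : samogloskiGoB vowels rest = [] := by
  rw [samogloskiGoB]; split <;> simp_all

theorem samogloskiGoB_some (vowels rest : List Char) (cut : Nat)
    (h : samogloskiCut vowels rest 0 = some cut) :
    samogloskiGoB vowels rest =
      String.ofList (PySem.List.slice rest none (some ((cut + 1 : Nat) : Int))) ::
        samogloskiGoB vowels (PySem.List.slice rest (some ((cut + 1 : Nat) : Int)) none) := by
  rw [samogloskiGoB]; split <;> simp_all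

-- The bridge: when A's state is in lock-step with a suffix of data, A's absolute slices are B's
-- suffix slices.
theorem samogloskiGo_eq (data vowels : List Char) :
    ∀ (n : Nat) (cs : List Char), cs.length ≤ n → ∀ (idx : Nat), cs = data.drop idx →
      samogloskiGoA data vowels cs ((idx : Int)) ((idx : Int)) = samogloskiGoB vowels cs := by
  intro n
  induction n with
  | zero =>
    intro cs hlen idx hcs
    have : cs = [] := List.eq_nil_of_length_eq_zero (Nat.le_zero.mp hlen)
    subst this
    rw [samogloskiGoA_step, samogloskiGoB_none vowels [] (by simp [samogloskiCut])]
    simp [samogloskiCut]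
  | succ n ih =>
    intro cs hlen idx hcs
    rw [samogloskiGoA_step]
    cases hj : samogloskiCut vowels cs 0 with
    | none => rw [samogloskiGoB_none vowels cs hj]
    | some j =>
      have hne : cs ≠ [] := samogloskiCut_ne_nil hj
      have hslice1 : PySem.List.slice data (some ((idx : Int))) (some ((idx : Int) + (j : Int) + 1)) =
          PySem.List.slice cs none (some ((j + 1 : Nat) : Int)) := by
        have h1 : (idx : Int) + (j : Int) + 1 = ((idx : Nat) : Int) + ((j + 1 : Nat) : Int) := by
          push_cast; ring
        rw [h1, PySem.List.slice_natCast_add, PySem.List.slice_to_natCast, hcs]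
      have hdrop : cs.drop (j + 1) = data.drop (idx + (j + 1)) := by
        rw [hcs, List.drop_drop]
      have hlen' : (cs.drop (j + 1)).length ≤ n := by
        have : 0 < cs.length := List.length_pos_of_ne_nil hne
        simp only [List.length_drop]; omega
      have hrec := ih (cs.drop (j + 1)) hlen' (idx + (j + 1)) hdrop
      have hcast2 : (idx : Int) + (j : Int) + 1 = ((idx + (j + 1) : Nat) : Int) := by push_cast; ring
      rw [samogloskiGoB_some vowels cs j hj, PySem.List.slice_from_natCast]
      show String.ofList (PySem.List.slice data (some ((idx : Int))) (some ((idx : Int) + (j : Int) + 1))) ::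
          samogloskiGoA data vowels (cs.drop (j + 1)) ((idx : Int) + (j : Int) + 1) ((idx : Int) + (j : Int) + 1) = _
      rw [hslice1, hcast2, hrec]

-- ===== VERDICT (by name: the statement is the Claim_ definition above) =====
theorem samogloski_spec : Claim_equal_samogloski := by
  intro data vowels _
  unfold Spec_samogloski samogloski samogloski_alt
  have := samogloskiGo_eq data.toList vowels.toList data.toList.length data.toList (le_refl _) 0 (by simp)
  simpa using this
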